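-- pv_equiv track=rewrite | github.com/Chellus/auto-project-builder | main.py | is_valid_project_name
-- ===== SOURCE A (Python) =====
-- import string
--
-- MIN_NAME_LENGTH = 2
--
-- MAX_NAME_LENGTH = 30
--
-- VALID_CHARS = (
--     list(string.ascii_uppercase) +
--     list(string.ascii_lowercase) +
--     [str(x) for x in range(10)] +
--     ['-', '_']
--     )
--
-- def is_valid_project_name(name):
--     for ch in name:
--         if ch not in VALID_CHARS:
--             return False
--
--     if len(name) < MIN_NAME_LENGTH:
--         return False
--
--     if len(name) > MAX_NAME_LENGTH:
--         return False
--
--     return True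
-- ===== SOURCE B (Python) =====
-- import re
--
-- _NAME_RE = re.compile(r'[A-Za-z0-9_\-]{2,30}')
--
-- def is_valid_project_name(name):
--     return _NAME_RE.fullmatch(name) is not None
-- ===== Notes on version B (the rewrite author's own statement) =====
-- stated objective: idiomatic
-- what changed: Replaced the explicit per-character membership loop plus separate min/max length guards with a single anchored regular-expression full match whose character class and {2,30} quantifier encode the same rule.
import Mathlib
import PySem

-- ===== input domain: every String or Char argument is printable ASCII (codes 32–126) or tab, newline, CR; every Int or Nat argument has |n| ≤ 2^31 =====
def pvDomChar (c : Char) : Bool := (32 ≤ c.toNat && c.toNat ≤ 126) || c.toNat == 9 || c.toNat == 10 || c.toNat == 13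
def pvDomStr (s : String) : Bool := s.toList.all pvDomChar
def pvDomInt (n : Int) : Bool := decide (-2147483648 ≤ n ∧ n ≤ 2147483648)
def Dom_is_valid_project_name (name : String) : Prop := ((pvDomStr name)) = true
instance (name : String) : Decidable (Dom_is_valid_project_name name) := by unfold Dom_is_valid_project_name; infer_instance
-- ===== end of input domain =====

-- B replaces A's explicit per-character membership loop plus separate min/max length guards
-- by one anchored regex full match (character class + {2,30} quantifier); objective: idiomatic.

-- ===== PORT A =====
-- VALID_CHARS: in Python a list of 1-character strings (list(str) yields 1-char strings)
def VALID_CHARS : List String :=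
  ("ABCDEFGHIJKLMNOPQRSTUVWXYZ".toList.map (fun c => String.ofList [c])) ++
  ("abcdefghijklmnopqrstuvwxyz".toList.map (fun c => String.ofList [c])) ++
  ((PySem.List.pyRange 0 10 1).map (fun x => PySem.Int.toStr x)) ++
  ["-", "_"]

-- the for-loop with early return False; on fall-through the two length guards run in order
def isValidLoopA : List String → String → Bool
  | [], name =>
      if PySem.Str.len name < 2 then false
      else if PySem.Str.len name > 30 then false
      else true
  | ch :: rest, name =>
      if ch ∈ VALID_CHARS then isValidLoopA rest name else false

def is_valid_project_name (name : String) : Bool :=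
  isValidLoopA (name.toList.map (fun c => String.ofList [c])) name

-- ===== PORT B =====
-- Source B is `re.fullmatch(r'[A-Za-z0-9_\-]{2,30}', name) is not None`; the regex is ported by
-- hand as its exact meaning (exact on all strings): every character matches the class
-- [A-Za-z0-9_-] and the anchored match consumes the whole string with length in {2,30}.
def reClassChar (c : Char) : Bool :=
  ('A' ≤ c && c ≤ 'Z') || ('a' ≤ c && c ≤ 'z') || ('0' ≤ c && c ≤ '9') || c == '_' || c == '-'

def is_valid_project_name_alt (name : String) : Bool :=
  name.toList.all reClassChar && 2 ≤ name.toList.length && name.toList.length ≤ 30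

-- ===== PRECONDITION & SPEC =====
def Spec_is_valid_project_name (name : String) (out : Bool) : Prop := out = is_valid_project_name_alt name
instance (name : String) (out : Bool) : Decidable (Spec_is_valid_project_name name out) := by unfold Spec_is_valid_project_name; infer_instance

-- ===== CLAIM (what is proved, stated in full; the proofs are below) =====
def Claim_equal_is_valid_project_name : Prop := ∀ (name : String), Dom_is_valid_project_name name → Spec_is_valid_project_name name (is_valid_project_name name)

-- ===== LEMMAS AND PROOFS =====

lemma valid_chars_eq : VALID_CHARS =
    ("ABCDEFGHIJKLMNOPQRSTUVWXYZabcdefghijklmnopqrstuvwxyz0123456789-_".toList).map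
      (fun c => String.ofList [c]) := by decide

lemma char_le_iff (c d : Char) : (c ≤ d) ↔ c.toNat ≤ d.toNat := by
  rw [Char.le_def, UInt32.le_iff_toNat_le]; rfl

lemma char_eq_iff (c d : Char) : (c = d) ↔ c.toNat = d.toNat := by
  rw [Char.ext_iff, ← UInt32.toNat_inj]; rfl

lemma mk1_inj : Function.Injective (fun c : Char => String.ofList [c]) := by
  intro a b h
  have := congrArg String.toList h
  simpa [String.toList_ofList] using this

lemma mem_valid_chars (c : Char) : (String.ofList [c] ∈ VALID_CHARS) ↔ reClassChar c = true := by
  rw [valid_chars_eq, List.mem_map_of_injective mk1_inj]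
  rw [show ("ABCDEFGHIJKLMNOPQRSTUVWXYZabcdefghijklmnopqrstuvwxyz0123456789-_".toList) =
    ['A','B','C','D','E','F','G','H','I','J','K','L','M','N','O','P','Q','R','S','T','U','V','W','X','Y','Z','a','b','c','d','e','f','g','h','i','j','k','l','m','n','o','p','q','r','s','t','u','v','w','x','y','z','0','1','2','3','4','5','6','7','8','9','-','_'] from by decide]
  simp only [List.mem_cons, List.not_mem_nil, or_false, reClassChar,
    Bool.or_eq_true, Bool.and_eq_true, decide_eq_true_eq, beq_iff_eq,
    char_eq_iff, char_le_iff]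
  simp only [show ('A' : Char).toNat = 65 from rfl, show ('B' : Char).toNat = 66 from rfl, show ('C' : Char).toNat = 67 from rfl, show ('D' : Char).toNat = 68 from rfl, show ('E' : Char).toNat = 69 from rfl, show ('F' : Char).toNat = 70 from rfl, show ('G' : Char).toNat = 71 from rfl, show ('H' : Char).toNat = 72 from rfl, show ('I' : Char).toNat = 73 from rfl, show ('J' : Char).toNat = 74 from rfl, show ('K' : Char).toNat = 75 from rfl, show ('L' : Char).toNat = 76 from rfl, show ('M' : Char).toNat = 77 from rfl, show ('N' : Char).toNat = 78 from rfl, show ('O' : Char).toNat = 79 from rfl, show ('P' : Char).toNat = 80 from rfl, show ('Q' : Char).toNat = 81 from rfl, show ('R' : Char).toNat = 82 from rfl, show ('S' : Char).toNat = 83 from rfl, show ('T' : Char).toNat = 84 from rfl, show ('U' : Char).toNat = 85 from rfl, show ('V' : Char).toNat = 86 from rfl, show ('W' : Char).toNat = 87 from rfl, show ('X' : Char).toNat = 88 from rfl, show ('Y' : Char).toNat = 89 from rfl, show ('Z' : Char).toNat = 90 from rfl, show ('a' : Char).toNat = 97 from rfl, show ('b' : Char).toNat = 98 from rfl, show ('c'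 : Char).toNat = 99 from rfl, show ('d' : Char).toNat = 100 from rfl, show ('e' : Char).toNat = 101 from rfl, show ('f' : Char).toNat = 102 from rfl, show ('g' : Char).toNat = 103 from rfl, show ('h' : Char).toNat = 104 from rfl, show ('i' : Char).toNat = 105 from rfl, show ('j' : Char).toNat = 106 from rfl, show ('k' : Char).toNat = 107 from rfl, show ('l' : Char).toNat = 108 from rfl, show ('m' : Char).toNat = 109 from rfl, show ('n' : Char).toNat = 110 from rfl, show ('o' : Char).toNat = 111 from rfl, show ('p' : Char).toNat = 112 from rfl, show ('q' : Char).toNat = 113 from rfl, show ('r' : Char).toNat = 114 from rfl, show ('s' : Char).toNat = 115 from rfl, show ('t' : Char).toNat = 116 from rfl, show ('u' : Char).toNat = 117 from rfl, show ('v' : Char).toNat = 118 from rfl, show ('w' : Char).toNat = 119 from rfl, show ('x' : Char).toNat = 120 from rfl, show ('y' : Char).toNat = 121 from rfl, show ('z' : Char).toNat = 122 from rfl, show ('0' : Char).toNat = 48 from rfl, show ('1' : Char).toNat = 49 from rfl, show ('2' : Char).toNat = 50 from rfl, show ('3' : Char).toNat = 51 from rfl, show ('4' : Char).toNat = 52 from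 rfl, show ('5' : Char).toNat = 53 from rfl, show ('6' : Char).toNat = 54 from rfl, show ('7' : Char).toNat = 55 from rfl, show ('8' : Char).toNat = 56 from rfl, show ('9' : Char).toNat = 57 from rfl, show ('-' : Char).toNat = 45 from rfl, show ('_' : Char).toNat = 95 from rfl]
  omega

lemma loopA_eq (name : String) (l : List Char) :
    isValidLoopA (l.map (fun c => String.ofList [c])) name =
      (l.all reClassChar && (if PySem.Str.len name < 2 then false
        else if PySem.Str.len name > 30 then false else true)) := by
  induction l with
  | nil => simp [isValidLoopA]
  | cons c rest ih =>
      simp only [List.map_cons, isValidLoopA, List.all_cons]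
      by_cases h : String.ofList [c] ∈ VALID_CHARS
      · have hc := (mem_valid_chars c).mp h
        simp [h, hc, ih]
      · have hc : ¬ reClassChar c = true := fun hc => h ((mem_valid_chars c).mpr hc)
        simp [h, hc]

-- ===== VERDICT (by name: the statement is the Claim_ definition above) =====
theorem is_valid_project_name_spec : Claim_equal_is_valid_project_name := by
  intro name _
  unfold Spec_is_valid_project_name is_valid_project_name is_valid_project_name_alt
  rw [loopA_eq name name.toList, PySem.Str.len_eq]
  by_cases hall : name.toList.all reClassChar
  · have e : name.toList.length = name.length := String.length_toList
    simp only [hall, Bool.true_and]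
    split_ifs with h1 h2
    · simp; omega
    · simp; omega
    · simp; omega
  · simp [hall]
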